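-- pv_equiv track=rewrite | github.com/edoardob90/aoc | 2024/07/python/alt.py | part1
-- ===== SOURCE A (Python) =====
-- def part1(data: list[tuple[int, list[int]]]) -> int:
--     """Solve part 1"""
--     from itertools import product
--     from operator import add, mul
--
--     def can_make_dumb(target, nums):
--         n = len(nums) - 1
--         for combo in range(2**n):
--             result = nums[0]
--             for i in range(n):
--                 if combo & (1 << i):
--                     result *= nums[i+1]
--                 else:
--                     result += nums[i+1]
--             if result == target:
--                 return True
--         return False
--
--     def can_make_smart(target, nums):
--         for ops in product((add, mul), repeat=len(nums)-1):
--             result = nums[0]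
--             for op, num in zip(ops, nums[1:]):
--                 result = op(result, num)
--             if result == target:
--                 return True
--         return False
--
--     return sum(target for target, nums in data if can_make_smart(target, nums))
-- ===== SOURCE B (Python) =====
-- def part1(data: list[tuple[int, list[int]]]) -> int:
--     """Solve part 1 by working backwards from the target with divisibility pruning."""
--
--     def can_rev(t, rev):
--         # rev is the numbers in reverse order; can the forward chain reach t?
--         if len(rev) == 1:
--             return t == rev[0]
--         last, rest = rev[0], rev[1:]
--         if last == 0:
--             # r * 0 == t only if t == 0 (any prefix value works); r + 0 == t -> same target
--             return t == 0 or can_rev(t, rest)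
--         return (t % last == 0 and can_rev(t // last, rest)) or can_rev(t - last, rest)
--
--     total = 0
--     for target, nums in data:
--         if can_rev(target, nums[::-1]):
--             total += target
--     return total
-- ===== Notes on version B (the rewrite author's own statement) =====
-- stated objective: faster
-- what changed: Replaces A's exhaustive forward enumeration of all 2^(n-1) add/mul operator tuples per record with a backward search from the target (divide when the last number divides it, else only subtract), pruning most branches.
import Mathlib
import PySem

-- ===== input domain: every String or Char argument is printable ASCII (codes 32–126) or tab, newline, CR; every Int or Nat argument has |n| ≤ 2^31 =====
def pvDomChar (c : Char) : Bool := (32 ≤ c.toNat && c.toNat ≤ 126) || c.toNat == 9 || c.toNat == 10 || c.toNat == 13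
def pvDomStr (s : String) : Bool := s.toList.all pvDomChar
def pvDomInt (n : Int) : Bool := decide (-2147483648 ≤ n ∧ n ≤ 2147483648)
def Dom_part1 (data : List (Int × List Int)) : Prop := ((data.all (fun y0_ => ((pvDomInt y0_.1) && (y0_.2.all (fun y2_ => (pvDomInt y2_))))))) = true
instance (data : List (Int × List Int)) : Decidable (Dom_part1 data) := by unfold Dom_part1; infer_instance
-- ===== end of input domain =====

-- B replaces A's exhaustive 2^(n-1) forward enumeration of operator tuples by a backward
-- search from the target with divisibility pruning (alternative algorithm; typically faster).

-- ===== PORT A =====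
-- itertools.product((add, mul), repeat=n): op represented as Bool (false = add, true = mul)
def prodRep : Nat → List (List Bool)
  | 0 => [[]]
  | n + 1 => [false, true].flatMap (fun b => (prodRep n).map (b :: ·))

-- result = nums[0]; for op, num in zip(ops, nums[1:]): result = op(result, num)
def evalOps (r : Int) (ops : List Bool) (tail : List Int) : Int :=
  (ops.zip tail).foldl (fun r p => if p.1 then r * p.2 else r + p.2) r

-- can_make_smart; nums = [] raises in Python (excluded by Pre_part1)
def canSmart (target : Int) (nums : List Int) : Bool :=
  match nums with
  | [] => false
  | x :: tail => (prodRep tail.length).any (fun ops => evalOps x ops tail == target)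

def part1 (data : List (Int × List Int)) : Int :=
  data.foldl (fun acc p => if canSmart p.1 p.2 then acc + p.1 else acc) 0

-- ===== PORT B =====
-- can_rev on the reversed list (t % last, t // last are Python's floor mod/div)
def canRev (t : Int) : List Int → Bool
  | [] => false
  | [x] => t == x
  | last :: rest =>
    if last == 0 then (t == 0) || canRev t rest
    else (PySem.Int.mod t last == 0 && canRev (PySem.Int.floordiv t last) rest)
         || canRev (t - last) rest

def part1_alt (data : List (Int × List Int)) : Int :=
  data.foldl (fun acc p => if canRev p.1 p.2.reverse then acc + p.1 else acc) 0

-- ===== PRECONDITION & SPEC =====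
-- Pre_ excludes records with an empty number list, on which A raises ValueError
-- (itertools.product with repeat = -1).
def Pre_part1 (data : List (Int × List Int)) : Prop :=
  ∀ p ∈ data, p.2 ≠ []
instance (data : List (Int × List Int)) : Decidable (Pre_part1 data) := by
  unfold Pre_part1; infer_instance

def pvWitness_part1 : (List (Int × List Int)) := [(5, [2, 3]), (7, [1, 2, 3])]

def Spec_part1 (data : List (Int × List Int)) (out : Int) : Prop := out = part1_alt data
instance (data : List (Int × List Int)) (out : Int) : Decidable (Spec_part1 data out) := by
  unfold Spec_part1; infer_instance

-- ===== CLAIM (what is proved, stated in full; the proofs are below) =====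
def Claim_equal_part1 : Prop := ∀ (data : List (Int × List Int)), Dom_part1 data → Pre_part1 data → Spec_part1 data (part1 data)

-- ===== LEMMAS AND PROOFS =====

-- values reachable from r by inserting + / * through tail
def Reach (r : Int) : List Int → Int → Prop
  | [], t => r = t
  | y :: tail, t => Reach (r + y) tail t ∨ Reach (r * y) tail t

lemma reach_nonempty (tail : List Int) (r : Int) : ∃ t, Reach r tail t := by
  induction tail generalizing r with
  | nil => exact ⟨r, rfl⟩
  | cons y tail ih => obtain ⟨t, ht⟩ := ih (r + y); exact ⟨t, Or.inl ht⟩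

lemma canSmart_iff_reach (x t : Int) (tail : List Int) :
    ((prodRep tail.length).any (fun ops => evalOps x ops tail == t)) = true ↔ Reach x tail t := by
  induction tail generalizing x with
  | nil => simp [prodRep, evalOps, Reach]
  | cons y tail ih =>
    have h1 : ∀ (b : Bool) (ops : List Bool), evalOps x (b :: ops) (y :: tail)
        = evalOps (if b then x * y else x + y) ops tail := by
      intro b ops; cases b <;> simp [evalOps]
    simp only [List.length_cons, prodRep, List.any_flatMap, List.any_map, List.any_cons,
      List.any_nil, Bool.or_false, Bool.or_eq_true, Function.comp_def, h1, Reach,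
      if_true, if_false, Bool.false_eq_true]
    exact or_congr (ih (x + y)) (ih (x * y))

lemma reach_append_singleton (tail : List Int) (x l t : Int) :
    Reach x (tail ++ [l]) t ↔ (Reach x tail (t - l) ∨ ∃ r, Reach x tail r ∧ r * l = t) := by
  induction tail generalizing x with
  | nil =>
    simp only [List.nil_append, Reach]
    constructor
    · rintro (h | h)
      · exact Or.inl (by omega)
      · exact Or.inr ⟨x, rfl, h⟩
    · rintro (h | ⟨r, hr, hm⟩)
      · exact Or.inl (by omega)
      · exact Or.inr (hr ▸ hm)
  | cons y tail ih =>
    simp only [List.cons_append, Reach, ih]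
    constructor
    · rintro ((h | ⟨r, hr, hm⟩) | (h | ⟨r, hr, hm⟩))
      · exact Or.inl (Or.inl h)
      · exact Or.inr ⟨r, Or.inl hr, hm⟩
      · exact Or.inl (Or.inr h)
      · exact Or.inr ⟨r, Or.inr hr, hm⟩
    · rintro ((h | h) | ⟨r, (hr | hr), hm⟩)
      · exact Or.inl (Or.inl h)
      · exact Or.inr (Or.inl h)
      · exact Or.inl (Or.inr ⟨r, hr, hm⟩)
      · exact Or.inr (Or.inr ⟨r, hr, hm⟩)

lemma exact_div_iff (l t r : Int) (hl : l ≠ 0) :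
    r * l = t ↔ (PySem.Int.mod t l = 0 ∧ r = PySem.Int.floordiv t l) := by
  constructor
  · rintro rfl
    have hd : l ∣ r * l := dvd_mul_left l r
    refine ⟨(PySem.Int.mod_eq_zero_iff_dvd _ _).2 hd, ?_⟩
    have := PySem.Int.floordiv_mul_add_mod (r * l) l
    rw [(PySem.Int.mod_eq_zero_iff_dvd _ _).2 hd] at this
    have : PySem.Int.floordiv (r * l) l * l = r * l := by omega
    exact (mul_right_cancel₀ hl this.symm)
  · rintro ⟨hm, rfl⟩
    have := PySem.Int.floordiv_mul_add_mod t l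
    omega

lemma canRev_iff_reach (rev : List Int) (x t : Int) :
    canRev t (rev ++ [x]) = true ↔ Reach x rev.reverse t := by
  induction rev generalizing t with
  | nil =>
    simp only [List.nil_append, List.reverse_nil]
    show (t == x) = true ↔ Reach x [] t
    simp only [beq_iff_eq, Reach]
    exact eq_comm
  | cons l rest ih =>
    have hne : rest ++ [x] ≠ [] := by simp
    have hstep : canRev t ((l :: rest) ++ [x])
        = (if l == 0 then (t == 0) || canRev t (rest ++ [x])
           else (PySem.Int.mod t l == 0 && canRev (PySem.Int.floordiv t l) (rest ++ [x]))
                || canRev (t - l) (rest ++ [x])) := by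
      cases rest with
      | nil => rfl
      | cons a as => rfl
    rw [hstep]
    have hrev : (l :: rest).reverse = rest.reverse ++ [l] := by simp
    rw [hrev, reach_append_singleton]
    by_cases hl : l = 0
    · subst hl
      simp only [beq_self_eq_true, if_true, Bool.or_eq_true, beq_iff_eq, ih]
      constructor
      · rintro (h | h)
        · subst h
          obtain ⟨r, hr⟩ := reach_nonempty rest.reverse x
          exact Or.inr ⟨r, hr, by ring⟩
        · exact Or.inl (by simpa using h)
      · rintro (h | ⟨r, hr, hm⟩)
        · exact Or.inr (by simpa using h)
        · exact Or.inl (by omega)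
    · simp only [beq_iff_eq, hl, if_false, Bool.or_eq_true, Bool.and_eq_true, ih]
      constructor
      · rintro (⟨hm, h⟩ | h)
        · refine Or.inr ⟨PySem.Int.floordiv t l, h, ?_⟩
          exact ((exact_div_iff l t _ hl).2 ⟨by simpa using hm, rfl⟩)
        · exact Or.inl h
      · rintro (h | ⟨r, hr, hm⟩)
        · exact Or.inr h
        · obtain ⟨h1, h2⟩ := (exact_div_iff l t r hl).1 hm
          exact Or.inl ⟨by simpa using h1, h2 ▸ hr⟩

lemma canSmart_eq_canRev (t : Int) (nums : List Int) (h : nums ≠ []) :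
    canSmart t nums = canRev t nums.reverse := by
  cases nums with
  | nil => exact absurd rfl h
  | cons x tail =>
    have hrev : (x :: tail).reverse = tail.reverse ++ [x] := by simp
    rw [hrev]
    have h1 := canSmart_iff_reach x t tail
    have h2 := canRev_iff_reach tail.reverse x t
    rw [List.reverse_reverse] at h2
    simp only [canSmart]
    cases hc : canRev t (tail.reverse ++ [x]) with
    | true => exact h1.2 (h2.1 hc)
    | false =>
      cases hsm : (prodRep tail.length).any (fun ops => evalOps x ops tail == t) with
      | false => rfl
      | true => rw [← hc]; exact (h2.2 (h1.1 hsm)).symm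

lemma foldl_pre_congr (l : List (Int × List Int)) (acc : Int) (h : ∀ p ∈ l, p.2 ≠ []) :
    l.foldl (fun acc p => if canSmart p.1 p.2 then acc + p.1 else acc) acc
    = l.foldl (fun acc p => if canRev p.1 p.2.reverse then acc + p.1 else acc) acc := by
  induction l generalizing acc with
  | nil => rfl
  | cons q qs ih =>
    have hq : q.2 ≠ [] := h q (List.mem_cons_self)
    simp only [List.foldl_cons, canSmart_eq_canRev q.1 q.2 hq]
    exact ih _ (fun r hr => h r (List.mem_cons_of_mem _ hr))

-- ===== VERDICT (by name: the statement is the Claim_ definition above) =====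
theorem part1_spec : Claim_equal_part1 := by
  intro data _ hpre
  unfold Spec_part1 part1 part1_alt
  exact foldl_pre_congr data 0 hpre
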